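-- pv_equiv track=rewrite | github.com/someflydev/agent-context-base | scripts/new_repo.py | _collect_block_scalar
-- ===== SOURCE A (Python) =====
-- def _collect_block_scalar(lines: list[str], start: int, parent_indent: int) -> tuple[str, int]:
--     """Collect YAML block-scalar text preserving its real multiline content."""
--
--     index = start
--     content: list[str] = []
--     block_indent: int | None = None
--     while index < len(lines):
--         raw_line = lines[index]
--         stripped = raw_line.strip()
--         current_indent = len(raw_line) - len(raw_line.lstrip(" "))
--         if stripped and current_indent <= parent_indent:
--             break
--         if stripped:
--             if block_indent is None:
--                 block_indent = current_indent
--             content.append(raw_line[block_indent:])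
--         else:
--             content.append("")
--         index += 1
--     while content and not content[-1]:
--         content.pop()
--     return "\n".join(content), index
-- ===== SOURCE B (Python) =====
-- def _collect_block_scalar(lines: list[str], start: int, parent_indent: int) -> tuple[str, int]:
--     """Collect YAML block-scalar text preserving its real multiline content.
--
--     Two-phase: first find the block's end index, then assemble the text from
--     the [start:end] slice with comprehensions and a backward trim.
--     """
--     n = len(lines)
--     end = start
--     while end < n:
--         raw = lines[end]
--         if raw.strip() and len(raw) - len(raw.lstrip(" ")) <= parent_indent:
--             break
--         end += 1
--     block = [lines[j] for j in range(start, end)]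
--     block_indent = next((len(r) - len(r.lstrip(" ")) for r in block if r.strip()), 0)
--     parts = [r[block_indent:] if r.strip() else "" for r in block]
--     drop = 0
--     for p in reversed(parts):
--         if p:
--             break
--         drop += 1
--     return "\n".join(parts[:len(parts) - drop]), end
-- ===== Notes on version B (the rewrite author's own statement) =====
-- stated objective: alternative
-- what changed: A's single interleaved while-loop (appending content, lazily setting block_indent, then a destructive pop-loop) is replaced by three separate phases: a forward scan that only finds the block's end index, a comprehension over the [start:end] slice with the indent taken from the first non-blank line, and a backward count of trailing empty entries removed by one slice.
import Mathlib
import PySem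

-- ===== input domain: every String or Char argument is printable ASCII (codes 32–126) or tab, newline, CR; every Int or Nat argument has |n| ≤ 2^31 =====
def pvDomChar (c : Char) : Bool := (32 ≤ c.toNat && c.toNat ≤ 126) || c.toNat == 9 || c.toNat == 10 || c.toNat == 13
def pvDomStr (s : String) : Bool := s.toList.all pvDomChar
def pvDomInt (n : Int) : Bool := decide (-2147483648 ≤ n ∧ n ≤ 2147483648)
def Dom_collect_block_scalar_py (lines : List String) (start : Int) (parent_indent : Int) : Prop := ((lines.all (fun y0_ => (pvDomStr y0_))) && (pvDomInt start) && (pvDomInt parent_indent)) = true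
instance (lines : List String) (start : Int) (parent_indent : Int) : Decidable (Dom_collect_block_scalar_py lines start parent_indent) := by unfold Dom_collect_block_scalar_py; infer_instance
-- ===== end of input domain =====

-- B splits A's interleaved loop into boundary detection, slice assembly by comprehension, and a backward trim;
-- objective: alternative decomposition (same asymptotic cost).

-- ===== PORT A =====
-- len(raw) - len(raw.lstrip(" ")): exact hand port — lstrip(" ") removes exactly the leading space characters
def pvLineIndent (raw : String) : Int :=
  PySem.Str.len raw - ((raw.toList.dropWhile (fun c => c == ' ')).length : Int)

-- while content and not content[-1]: content.pop()
def pvPopTrailing (content : List String) : List String :=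
  if h : content ≠ [] ∧ PySem.List.pyGet? content (-1) = some "" then
    pvPopTrailing content.dropLast
  else content
termination_by content.length
decreasing_by
  have : content ≠ [] := h.1
  have : 0 < content.length := List.length_pos_iff.mpr this
  simp [List.length_dropLast]; omega

-- the main while-loop of A, carrying (index, content, block_indent)
def pvLoopA (lines : List String) (parent_indent : Int) (index : Int)
    (content : List String) (block_indent : Option Int) : List String × Int :=
  if index < (lines.length : Int) then
    match PySem.List.pyGet? lines index with
    | none => (content, index)   -- Python raises IndexError here (index < -len); excluded by Pre_
    | some raw_line =>
      if PySem.Str.strip raw_line ≠ "" ∧ pvLineIndent raw_line ≤ parent_indent then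
        (content, index)
      else if PySem.Str.strip raw_line ≠ "" then
        let b := block_indent.getD (pvLineIndent raw_line)
        pvLoopA lines parent_indent (index + 1)
          (content ++ [PySem.Str.slice raw_line (some b) none]) (some b)
      else
        pvLoopA lines parent_indent (index + 1) (content ++ [""]) block_indent
  else (content, index)
termination_by ((lines.length : Int) - index).toNat
decreasing_by all_goals omega

def collect_block_scalar_py (lines : List String) (start : Int) (parent_indent : Int) : String × Int :=
  let r := pvLoopA lines parent_indent start [] none
  (PySem.Str.join "\n" (pvPopTrailing r.1), r.2)

-- ===== PORT B =====
-- phase 1 of B: scan forward for the block's end index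
def pvEndB (lines : List String) (parent_indent : Int) (e : Int) : Int :=
  if e < (lines.length : Int) then
    match PySem.List.pyGet? lines e with
    | none => e   -- Python raises IndexError here (e < -len); excluded by Pre_
    | some raw =>
      if PySem.Str.strip raw ≠ "" ∧ pvLineIndent raw ≤ parent_indent then e
      else pvEndB lines parent_indent (e + 1)
  else e
termination_by ((lines.length : Int) - e).toNat
decreasing_by all_goals omega

def collect_block_scalar_py_alt (lines : List String) (start : Int) (parent_indent : Int) : String × Int :=
  let e := pvEndB lines parent_indent start
  -- block = [lines[j] for j in range(start, end)]; every j is in range under Pre_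
  let block := (PySem.List.pyRange start e 1).map (fun j => (PySem.List.pyGet? lines j).getD "")
  -- block_indent = next((… for r in block if r.strip()), 0)
  let block_indent := match block.find? (fun r => PySem.Str.strip r != "") with
    | some r => pvLineIndent r
    | none => 0
  let parts := block.map (fun r =>
    if PySem.Str.strip r ≠ "" then PySem.Str.slice r (some block_indent) none else "")
  -- the reversed-for with break counts the trailing falsy entries
  let drop := (parts.reverse.takeWhile (fun p => p == "")).length
  (PySem.Str.join "\n" (PySem.List.slice parts none (some ((parts.length : Int) - (drop : Int)))), e)

-- ===== PRECONDITION & SPEC =====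
-- Pre_ excludes exactly the inputs where Python A raises IndexError: a start below -len(lines).
def Pre_collect_block_scalar_py (lines : List String) (start : Int) (parent_indent : Int) : Prop :=
  -(lines.length : Int) ≤ start
instance (lines : List String) (start : Int) (parent_indent : Int) : Decidable (Pre_collect_block_scalar_py lines start parent_indent) := by unfold Pre_collect_block_scalar_py; infer_instance

def pvWitness_collect_block_scalar_py : List String × Int × Int := ([" a", "  b", "c"], 0, 0)

def Spec_collect_block_scalar_py (lines : List String) (start : Int) (parent_indent : Int) (out : String × Int) : Prop := out = collect_block_scalar_py_alt lines start parent_indent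
instance (lines : List String) (start : Int) (parent_indent : Int) (out : String × Int) : Decidable (Spec_collect_block_scalar_py lines start parent_indent out) := by unfold Spec_collect_block_scalar_py; infer_instance

-- ===== CLAIM (what is proved, stated in full; the proofs are below) =====
def Claim_equal_collect_block_scalar_py : Prop := ∀ (lines : List String) (start : Int) (parent_indent : Int), Dom_collect_block_scalar_py lines start parent_indent → Pre_collect_block_scalar_py lines start parent_indent → Spec_collect_block_scalar_py lines start parent_indent (collect_block_scalar_py lines start parent_indent)

-- ===== LEMMAS AND PROOFS =====

-- the tail of content that A's loop appends from position i on
def pvSeg (lines : List String) (parent_indent : Int) (i : Int) (bi : Option Int) : List String :=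
  if i < (lines.length : Int) then
    match PySem.List.pyGet? lines i with
    | none => []
    | some raw =>
      if PySem.Str.strip raw ≠ "" ∧ pvLineIndent raw ≤ parent_indent then []
      else if PySem.Str.strip raw ≠ "" then
        let b := bi.getD (pvLineIndent raw)
        PySem.Str.slice raw (some b) none :: pvSeg lines parent_indent (i + 1) (some b)
      else "" :: pvSeg lines parent_indent (i + 1) bi
  else []
termination_by ((lines.length : Int) - i).toNat
decreasing_by all_goals omega

-- pvSeg restated as a fold over the already-fetched lines, threading the optional indent
def pvMapSeg : List String → Option Int → List String
  | [], _ => []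
  | r :: rs, bi =>
    if PySem.Str.strip r ≠ "" then
      let b := bi.getD (pvLineIndent r)
      PySem.Str.slice r (some b) none :: pvMapSeg rs (some b)
    else "" :: pvMapSeg rs bi

theorem pvEndB_ge (lines : List String) (parent_indent : Int) (e : Int) :
    e ≤ pvEndB lines parent_indent e := by
  fun_induction pvEndB <;> omega

theorem pvLoopA_eq (lines : List String) (parent_indent : Int) (i : Int)
    (c : List String) (bi : Option Int) :
    pvLoopA lines parent_indent i c bi
      = (c ++ pvSeg lines parent_indent i bi, pvEndB lines parent_indent i) := by
  fun_induction pvLoopA with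
  | case1 i c bi h hget =>
    rw [pvSeg, pvEndB]; simp [h, hget]
  | case2 i c bi h raw hget hbreak =>
    rw [pvSeg, pvEndB]; simp [h, hget, hbreak]
  | case3 i c bi h raw hget hbreak hnb b ih =>
    have hb2 : ¬ pvLineIndent raw ≤ parent_indent := fun hb => hbreak ⟨hnb, hb⟩
    rw [pvSeg, pvEndB]; simp [h, hget, hnb, hb2] at ih ⊢; simp [ih]; exact ⟨rfl, rfl⟩
  | case4 i c bi h raw hget hbreak hnb ih =>
    rw [pvSeg, pvEndB]; simp [h, hget, hnb] at ih ⊢; simp [ih]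
  | case5 i c bi h =>
    rw [pvSeg, pvEndB]; simp [h]

theorem pvSeg_eq_mapSeg (lines : List String) (parent_indent : Int) (i : Int) (bi : Option Int) :
    pvSeg lines parent_indent i bi
      = pvMapSeg ((PySem.List.pyRange i (pvEndB lines parent_indent i) 1).map
          (fun j => (PySem.List.pyGet? lines j).getD "")) bi := by
  fun_induction pvSeg with
  | case1 i bi h hget =>
    rw [pvEndB]; simp [h, hget, PySem.List.pyRange_one_eq_nil (le_refl i), pvMapSeg]
  | case2 i bi h raw hget hbreak =>
    rw [pvEndB]; simp [h, hget, hbreak, PySem.List.pyRange_one_eq_nil (le_refl i), pvMapSeg]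
  | case3 i bi h raw hget hbreak hnb b ih =>
    have hb2 : ¬ pvLineIndent raw ≤ parent_indent := fun hb => hbreak ⟨hnb, hb⟩
    have he : i < pvEndB lines parent_indent (i + 1) := by
      have := pvEndB_ge lines parent_indent (i + 1); omega
    rw [pvEndB]; simp only [h, hget, hnb, hb2, if_true, ite_false, ite_true, and_true,
      not_false_eq_true, if_neg, if_pos]
    rw [if_neg (by tauto), PySem.List.pyRange_one_cons he]
    simp [pvMapSeg, hget, hnb, ih]
    exact ⟨rfl, rfl⟩
  | case4 i bi h raw hget hbreak hnb ih =>
    have he : i < pvEndB lines parent_indent (i + 1) := by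
      have := pvEndB_ge lines parent_indent (i + 1); omega
    rw [pvEndB]
    rw [if_pos h]
    simp only [hget]
    rw [if_neg (by tauto)]
    rw [PySem.List.pyRange_one_cons he]
    simp [pvMapSeg, hget, hnb, ih]
  | case5 i bi h =>
    rw [pvEndB]; simp [h, PySem.List.pyRange_one_eq_nil (le_refl i), pvMapSeg]

theorem pvMapSeg_some (rs : List String) (b : Int) :
    pvMapSeg rs (some b)
      = rs.map (fun r => if PySem.Str.strip r ≠ "" then PySem.Str.slice r (some b) none else "") := by
  induction rs with
  | nil => simp [pvMapSeg]
  | cons r rs ih => by_cases h : PySem.Str.strip r = "" <;> simp [pvMapSeg, h, ih]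

-- pvMapSeg starting with no indent = B's comprehension with B's block_indent
theorem pvMapSeg_none (block : List String) :
    pvMapSeg block none
      = block.map (fun r =>
          if PySem.Str.strip r ≠ "" then
            PySem.Str.slice r (some (match block.find? (fun r => PySem.Str.strip r != "") with
              | some r => pvLineIndent r
              | none => 0)) none
          else "") := by
  induction block with
  | nil => simp [pvMapSeg]
  | cons r rs ih =>
    by_cases h : PySem.Str.strip r = ""
    · have hf : (PySem.Str.strip r != "") = false := by simp [h]
      simp only [pvMapSeg, h]
      simp only [List.find?_cons, hf, List.map_cons, ih]
      simp [h]
    · have hf : (PySem.Str.strip r != "") = true := by simp [h]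
      simp only [pvMapSeg, h]
      simp only [List.find?_cons, hf, List.map_cons]
      simp [h, pvMapSeg_some]

theorem pvPopTrailing_eq_take (xs : List String) :
    pvPopTrailing xs = xs.take (xs.length - (xs.reverse.takeWhile (fun p => p == "")).length) := by
  induction xs using List.reverseRecOn with
  | nil => rw [pvPopTrailing]; simp
  | append_singleton xs x ih =>
    have hget : PySem.List.pyGet? (xs ++ [x]) (-1) = some x :=
      PySem.List.pyGet?_neg_one_append_singleton xs x
    by_cases h : x = ""
    · subst h
      rw [pvPopTrailing, dif_pos ⟨by simp, by rw [hget]⟩, List.dropLast_concat, ih]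
      have htw : ((xs ++ [""]).reverse.takeWhile (fun p => p == "")).length
          = (xs.reverse.takeWhile (fun p => p == "")).length + 1 := by
        simp [List.takeWhile_cons]
      have hle : xs.length - (xs.reverse.takeWhile (fun p => p == "")).length ≤ xs.length := by
        omega
      have hlen : (xs ++ [""]).length - ((xs.reverse.takeWhile (fun p => p == "")).length + 1)
          = xs.length - (xs.reverse.takeWhile (fun p => p == "")).length := by simp
      rw [htw, hlen, List.take_append_of_le_length hle]
    · rw [pvPopTrailing, dif_neg (by simp [hget, h])]
      have htw : ((xs ++ [x]).reverse.takeWhile (fun p => p == "")).length = 0 := by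
        simp [List.takeWhile_cons, h]
      rw [htw]
      simp

-- trailing-blank count never exceeds the length
theorem pvDrop_le (xs : List String) :
    (xs.reverse.takeWhile (fun p => p == "")).length ≤ xs.length := by
  have := (List.takeWhile_sublist (p := fun p => p == "") (l := xs.reverse)).length_le
  simpa using this

-- ===== VERDICT (by name: the statement is the Claim_ definition above) =====
theorem collect_block_scalar_py_spec : Claim_equal_collect_block_scalar_py := by
  intro lines start parent_indent _hDom _hPre
  unfold Spec_collect_block_scalar_py collect_block_scalar_py collect_block_scalar_py_alt
  simp only [pvLoopA_eq, List.nil_append]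
  rw [pvSeg_eq_mapSeg, pvMapSeg_none]
  set parts := ((PySem.List.pyRange start (pvEndB lines parent_indent start) 1).map
      (fun j => (PySem.List.pyGet? lines j).getD "")).map _ with hparts
  have hdrop := pvDrop_le parts
  rw [show ((parts.length : Int) - ((parts.reverse.takeWhile (fun p => p == "")).length : Int))
      = ((parts.length - (parts.reverse.takeWhile (fun p => p == "")).length : Nat) : Int) by push_cast; omega]
  rw [PySem.List.slice_to_natCast]
  rw [pvPopTrailing_eq_take]
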